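-- pv_equiv track=rewrite | github.com/rossyvallejo/course_python | class/e12_adm_price.py | calcular_precio
-- ===== SOURCE A (Python) =====
-- def calcular_precio(edades):
--     precio_total = 0
--     for edad in edades:
--         if edad <= 2:
--             precio_total += 0
--         elif 3 <= edad <= 12:
--             precio_total += 14
--         elif edad >= 65:
--             precio_total += 18
--         else:
--             precio_total += 23
--     return precio_total
-- ===== SOURCE B (Python) =====
-- def calcular_precio(edades):
--     kids = sum(1 for e in edades if 3 <= e <= 12)
--     seniors = sum(1 for e in edades if e >= 65)
--     adults = sum(1 for e in edades if e > 2 and not (3 <= e <= 12) and e < 65)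
--     return 14 * kids + 18 * seniors + 23 * adults
-- ===== Notes on version B (the rewrite author's own statement) =====
-- stated objective: alternative
-- what changed: B counts each bracket (kids, seniors, adults) in separate countP passes and combines the counts arithmetically (14*kids+18*seniors+23*adults), instead of A's single loop accumulating the price inline.
import Mathlib
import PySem

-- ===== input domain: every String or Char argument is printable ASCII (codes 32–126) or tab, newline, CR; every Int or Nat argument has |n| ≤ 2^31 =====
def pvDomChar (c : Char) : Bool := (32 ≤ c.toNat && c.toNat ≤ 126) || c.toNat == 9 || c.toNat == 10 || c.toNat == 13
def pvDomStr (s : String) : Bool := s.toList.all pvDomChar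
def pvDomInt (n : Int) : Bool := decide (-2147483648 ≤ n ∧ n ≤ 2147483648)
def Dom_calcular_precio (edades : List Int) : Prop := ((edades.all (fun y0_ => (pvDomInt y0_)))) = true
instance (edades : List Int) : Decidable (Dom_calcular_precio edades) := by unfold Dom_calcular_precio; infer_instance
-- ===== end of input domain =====

-- B counts each bracket separately (countP passes) and combines counts arithmetically, instead of A's inline accumulating loop (alternative decomposition, same cost).


-- ===== PORT A =====
-- A: one loop accumulating the price per age.
def calcular_precio (edades : List Int) : Int :=
  edades.foldl
    (fun precio_total edad =>
      if edad ≤ 2 then precio_total + 0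
      else if 3 ≤ edad ∧ edad ≤ 12 then precio_total + 14
      else if edad ≥ 65 then precio_total + 18
      else precio_total + 23)
    0

-- ===== PORT B =====
-- B: count each bracket in separate passes, then combine arithmetically.
def calcular_precio_alt (edades : List Int) : Int :=
  let kids := edades.countP (fun e => decide (3 ≤ e ∧ e ≤ 12))
  let seniors := edades.countP (fun e => decide (e ≥ 65))
  let adults := edades.countP (fun e => decide (e > 2 ∧ ¬(3 ≤ e ∧ e ≤ 12) ∧ e < 65))
  14 * (kids : Int) + 18 * (seniors : Int) + 23 * (adults : Int)

-- ===== PRECONDITION & SPEC =====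
def Spec_calcular_precio (edades : List Int) (out : Int) : Prop := out = calcular_precio_alt edades
instance (edades : List Int) (out : Int) : Decidable (Spec_calcular_precio edades out) := by unfold Spec_calcular_precio; infer_instance

-- ===== CLAIM (what is proved, stated in full; the proofs are below) =====
def Claim_equal_calcular_precio : Prop := ∀ (edades : List Int), Dom_calcular_precio edades → Spec_calcular_precio edades (calcular_precio edades)

-- ===== LEMMAS AND PROOFS =====

theorem calcular_precio_foldl_shift (edades : List Int) (c : Int) :
    edades.foldl
      (fun precio_total edad =>
        if edad ≤ 2 then precio_total + 0
        else if 3 ≤ edad ∧ edad ≤ 12 then precio_total + 14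
        else if edad ≥ 65 then precio_total + 18
        else precio_total + 23)
      c =
    c + edades.foldl
      (fun precio_total edad =>
        if edad ≤ 2 then precio_total + 0
        else if 3 ≤ edad ∧ edad ≤ 12 then precio_total + 14
        else if edad ≥ 65 then precio_total + 18
        else precio_total + 23)
      0 := by
  induction edades generalizing c with
  | nil => simp
  | cons e es ih =>
    simp only [List.foldl_cons]
    rw [ih, ih (if e ≤ 2 then 0 + 0 else if 3 ≤ e ∧ e ≤ 12 then 0 + 14 else if e ≥ 65 then 0 + 18 else 0 + 23)]
    split_ifs <;> ring

theorem calcular_precio_eq_alt (edades : List Int) :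
    calcular_precio edades = calcular_precio_alt edades := by
  induction edades with
  | nil => simp [calcular_precio, calcular_precio_alt]
  | cons e es ih =>
    simp only [calcular_precio, calcular_precio_alt, List.foldl_cons, List.countP_cons] at *
    rw [calcular_precio_foldl_shift]
    rw [ih]
    by_cases h1 : e ≤ 2 <;> by_cases h2 : 3 ≤ e ∧ e ≤ 12 <;> by_cases h3 : e ≥ 65 <;>
      simp [h1, h2, h3] <;> push_cast <;> omega

-- ===== VERDICT (by name: the statement is the Claim_ definition above) =====
theorem calcular_precio_spec : Claim_equal_calcular_precio := by
  intro edades _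
  unfold Spec_calcular_precio
  exact calcular_precio_eq_alt edades
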